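-- pv_equiv track=rewrite | github.com/allieun/Algorithm | baekjoon/1679(숨바꼭질).py | bfs
-- ===== SOURCE A (Python) =====
-- from collections import deque
--
-- def bfs(n, k):                       # 입력받은 정보인 n(수빈위치), k(동생위치)를 bfs 함수에 입력
--     q = deque([n])                   # 덱에 시작 위치인 수빈이의 위치를 입력
--     max_lim = 100000                 # 최대영역을 설정하는 이유는 수빈이와 동생이 위치 범위가 10만까지라서
--     visited = [-1] * (max_lim + 1)   # visited 이렇게 설정하는 이유는 인덱스가 0부터 시작하기 때문
--     visited[n] = 0                   # 첫 시작은 0(방문처리)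
--
--     while q:                      # 큐 안에서
--         current = q.popleft()     # 현재 위치 확인
--         if current == k:          # 만약 현재 위치가 동생의 위치라면 현재 위치까지 이동하느라 생긴 시간 출력
--             return visited[current]
--
--         for next_node in (current-1, current+1, current*2):     # 이동 방향(-1, +1, *2)의 범위에서
--             if 0 <= next_node <= max_lim and visited[next_node] == -1:   # 다음 이동할 칸이 이동 범위 안이고, 아직 방문하지 않았다면
--                 visited[next_node] = visited[current]+1         # 다음 방문 노드는 현재 위치를 방문한 시간에 1을 더함
--                 q.append(next_node)               # 큐에 현재 방문한 노드를 넣어서 다음 탐색 진행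
-- ===== SOURCE B (Python) =====
-- def bfs(n, k):
--     # Backward level-BFS: search from k toward n using the INVERSE moves
--     # (+1, -1, halve when even), counting whole levels until n is met.
--     max_lim = 100000
--     seen = [False] * (max_lim + 1)
--     seen[k] = True
--     frontier = [k]
--     step = 0
--     while frontier:
--         if n in frontier:
--             return step
--         nxt = []
--         for y in frontier:
--             cands = [y - 1, y + 1]
--             if y % 2 == 0:
--                 cands.append(y // 2)
--             for m in cands:
--                 if 0 <= m <= max_lim and not seen[m]:
--                     seen[m] = True
--                     nxt.append(m)
--         frontier = nxt
--         step += 1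
-- ===== Notes on version B (the rewrite author's own statement) =====
-- stated objective: alternative
-- what changed: Replaces A's forward deque-BFS from n (a distance array read back at the goal, expanding current-1/current+1/current*2) by a backward level-synchronous search from k using the inverse moves (+1, -1, halve when even): a Boolean seen-table, whole-level frontier lists and an explicit step counter returned when n appears in the frontier.
-- outside the precondition, e.g. on bfs(-1, 5): A returns 5, B returns None; on bfs(5, 200000): A returns None, B raises IndexError
import Mathlib
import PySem

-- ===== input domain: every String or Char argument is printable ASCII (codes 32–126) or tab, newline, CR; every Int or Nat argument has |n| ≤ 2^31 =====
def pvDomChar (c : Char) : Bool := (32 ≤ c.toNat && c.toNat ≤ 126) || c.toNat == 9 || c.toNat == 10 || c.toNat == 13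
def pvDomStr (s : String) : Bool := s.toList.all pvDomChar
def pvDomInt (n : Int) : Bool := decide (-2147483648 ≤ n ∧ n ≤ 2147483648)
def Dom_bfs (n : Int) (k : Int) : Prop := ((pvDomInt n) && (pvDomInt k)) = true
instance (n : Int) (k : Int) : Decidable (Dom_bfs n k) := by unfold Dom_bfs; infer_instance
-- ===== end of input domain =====

-- B replaces A's forward deque-BFS (distance array indexed by position, expanding n-1/n+1/2n)
-- by a backward level-synchronous search from k over sets, using the INVERSE moves
-- (+1, -1, halve when even) and counting levels until n is met; objective: alternative.

-- ===== PORT A =====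
-- A's inner `for next_node in (current-1, current+1, current*2)` body, as the fold step
-- on the state (visited array, queue); `q.append` is the array push.
def bfsVisitA (c : Int) (s : Array Int × Array Int) (x : Int) : Array Int × Array Int :=
  if 0 ≤ x ∧ x ≤ 100000 ∧ s.1.getD x.toNat 0 = -1 then
    (s.1.setIfInBounds x.toNat (s.1.getD c.toNat 0 + 1), s.2.push x)
  else s

-- A's `while q` loop; the deque is modelled exactly as the array of its elements plus the
-- index i of its front (`popleft` reads q[i] and advances i). Fuel only makes the recursion
-- structural (proved sufficient below), and -1 is returned only on empty queue / fuel
-- exhaustion, which Pre_bfs rules out.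
def bfsLoopA (k : Int) : Nat → Nat → Array Int → Array Int → Int
  | 0, _, _, _ => -1
  | fuel + 1, i, q, v =>
    if i < q.size then
      let c := q.getD i 0
      if c = k then v.getD c.toNat 0
      else
        let s := [c - 1, c + 1, c * 2].foldl (bfsVisitA c) (v, q)
        bfsLoopA k fuel (i + 1) s.2 s.1
    else -1

def bfs (n : Int) (k : Int) : Int :=
  bfsLoopA k 300005 0 #[n] ((Array.replicate 100001 (-1 : Int)).setIfInBounds n.toNat 0)

-- ===== PORT B =====
-- B's inverse-move candidate list: y-1, y+1, and y//2 when y is even.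
def nbrB (y : Int) : List Int :=
  [y - 1, y + 1] ++ (if PySem.Int.mod y 2 = 0 then [PySem.Int.floordiv y 2] else [])

-- B's inner `if 0 <= m <= max_lim and not seen[m]: seen[m] = True; nxt.append(m)` on the
-- state (seen table, nxt); `nxt.append` is the array push.
def pvMark (s : Array Bool × Array Int) (m : Int) : Array Bool × Array Int :=
  if 0 ≤ m ∧ m ≤ 100000 ∧ s.1.getD m.toNat false = false then
    (s.1.setIfInBounds m.toNat true, s.2.push m)
  else s

-- B's `while frontier` loop (generic in the candidate function; B instantiates it with nbrB).
-- Fuel only makes the recursion structural; -1 stands for Python's fall-through None,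
-- which Pre_bfs rules out.
def levelLoop (nbr : Int → List Int) (tgt : Int) : Nat → Array Int → Array Bool → Int → Int
  | 0, _, _, _ => -1
  | fuel + 1, f, seen, step =>
    if f.size = 0 then -1
    else if tgt ∈ f then step
    else
      let s := f.foldl (fun s y => (nbr y).foldl pvMark s) (seen, #[])
      levelLoop nbr tgt fuel s.2 s.1 (step + 1)

def bfs_alt (n : Int) (k : Int) : Int :=
  levelLoop nbrB n 200005 #[k] ((Array.replicate 100001 false).setIfInBounds k.toNat true) 0

-- ===== PRECONDITION & SPEC =====
-- Pre_bfs is the problem's natural domain 0 ≤ n,k ≤ 100000 (BOJ 1697 guarantees it). Outside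
-- it A raises IndexError (n > 100000 or n < -100001), or returns a value that hinges on
-- Python's negative-index wraparound (n < 0) or on k lying outside the 100001-cell board —
-- corners where B's backward search from k legitimately returns something else (see cites).
def Pre_bfs (n : Int) (k : Int) : Prop := 0 ≤ n ∧ n ≤ 100000 ∧ 0 ≤ k ∧ k ≤ 100000
instance (n : Int) (k : Int) : Decidable (Pre_bfs n k) := by unfold Pre_bfs; infer_instance
def pvWitness_bfs : Int × Int := (5, 17)

def Spec_bfs (n : Int) (k : Int) (out : Int) : Prop := out = bfs_alt n k
instance (n : Int) (k : Int) (out : Int) : Decidable (Spec_bfs n k out) := by unfold Spec_bfs; infer_instance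

-- ===== CLAIM (what is proved, stated in full; the proofs are below) =====
def Claim_equal_bfs : Prop := ∀ (n : Int) (k : Int), Dom_bfs n k → Pre_bfs n k → Spec_bfs n k (bfs n k)

-- ===== LEMMAS AND PROOFS =====

-- ----- list-state twins of the two ports (proof helpers; the ports are bridged to them) -----

-- list-state twin of A's visit step
def bfsVisitL (c : Int) (s : Array Int × List Int) (x : Int) : Array Int × List Int :=
  if 0 ≤ x ∧ x ≤ 100000 ∧ s.1.getD x.toNat 0 = -1 then
    (s.1.setIfInBounds x.toNat (s.1.getD c.toNat 0 + 1), s.2 ++ [x])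
  else s

-- list-state twin of A's loop (queue as a plain list)
def bfsLoopL (k : Int) : Nat → List Int → Array Int → Int
  | 0, _, _ => -1
  | _ + 1, [], _ => -1
  | fuel + 1, c :: q, v =>
    if c = k then v.getD c.toNat 0
    else
      let s := [c - 1, c + 1, c * 2].foldl (bfsVisitL c) (v, q)
      bfsLoopL k fuel s.2 s.1

-- list-state twin of B's mark step (seen as the list of marked values)
def pvMarkL (s : List Int × List Int) (m : Int) : List Int × List Int :=
  if 0 ≤ m ∧ m ≤ 100000 ∧ ¬ m ∈ s.1 then (PySem.Set.add s.1 m, PySem.Set.add s.2 m) else s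

-- list-state twin of B's level loop
def levelLoopL (nbr : Int → List Int) (tgt : Int) : Nat → List Int → List Int → Int → Int
  | 0, _, _, _ => -1
  | _ + 1, [], _, _ => -1
  | fuel + 1, c :: f, seen, step =>
    if tgt ∈ c :: f then step
    else
      let s := (c :: f).foldl (fun s y => (nbr y).foldl pvMarkL s) (seen, [])
      levelLoopL nbr tgt fuel s.2 s.1 (step + 1)


-- A-side neighbour list (A expands current-1, current+1, current*2), used only by the proofs
-- to run A's exploration through the generic level loop.
def nbrF (y : Int) : List Int := [y - 1, y + 1, y * 2]

-- Relation between A's distance array and the level loop's seen-set: correct size, and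
-- an index is in the seen-set exactly when A has assigned it a distance.
def pvRel (v : Array Int) (seen : List Int) : Prop :=
  v.size = 100001 ∧ ∀ i : Nat, i < 100001 → ((i : Int) ∈ seen ↔ v.getD i 0 ≠ -1)

-- number of unvisited cells in A's array
def pvCnt (v : Array Int) : Nat := v.toList.count (-1)

-- termination measure for A's loop
def pvM (v : Array Int) (q : List Int) : Nat := q.length + 2 * pvCnt v

theorem pv_getD_set_self (a : Array Int) (i : Nat) (x d : Int) (h : i < a.size) :
    (a.setIfInBounds i x).getD i d = x := by
  simp [Array.getD, h]

theorem pv_getD_set_ne (a : Array Int) (i j : Nat) (x d : Int) (h : i ≠ j) :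
    (a.setIfInBounds i x).getD j d = a.getD j d := by
  simp only [Array.getD, Array.size_setIfInBounds]
  split
  · next hj => exact Array.getElem_setIfInBounds_ne (by simpa using hj) h
  · rfl

theorem pv_count_set (l : List Int) (i : Nat) (a : Int) (hi : i < l.length)
    (h : l[i] = -1) (ha : a ≠ -1) : (l.set i a).count (-1) + 1 = l.count (-1) := by
  induction l generalizing i with
  | nil => simp at hi
  | cons hd tl ih =>
    cases i with
    | zero => simp_all
    | succ j =>
      simp only [List.set_cons_succ, List.count_cons]
      have := ih j (by simpa using hi) (by simpa using h)
      omega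

theorem pv_cnt_set (v : Array Int) (i : Nat) (a : Int) (hi : i < v.size)
    (hv : v.getD i 0 = -1) (ha : a ≠ -1) : pvCnt (v.setIfInBounds i a) + 1 = pvCnt v := by
  unfold pvCnt
  rw [Array.toList_setIfInBounds]
  exact pv_count_set v.toList i a (by simpa using hi)
    (by simpa [Array.getD, hi, Array.getElem_toList] using hv) ha

theorem pv_loopA_nil (k : Int) (fA : Nat) (v : Array Int) : bfsLoopL k fA [] v = -1 := by
  cases fA <;> rfl

theorem pv_add_of_not_mem (s : List Int) (m : Int) (h : ¬ m ∈ s) :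
    PySem.Set.add s m = s ++ [m] := by
  simp [PySem.Set.add, h]

-- One pass over a neighbour list: A's fold from (v, g ++ l) matches the level fold from (seen, l).
theorem pv_pairFold (step c : Int) (hstep : 0 ≤ step) :
    ∀ (xs : List Int) (v : Array Int) (seen : List Int) (g l : List Int),
      pvRel v seen → (∀ x, x ∈ l → x ∈ seen) → v.getD c.toNat 0 = step →
      (xs.foldl (bfsVisitL c) (v, g ++ l)).2 = g ++ (xs.foldl pvMarkL (seen, l)).2 ∧
      pvRel (xs.foldl (bfsVisitL c) (v, g ++ l)).1 (xs.foldl pvMarkL (seen, l)).1 ∧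
      (∀ x, x ∈ (xs.foldl pvMarkL (seen, l)).2 → x ∈ (xs.foldl pvMarkL (seen, l)).1) ∧
      (∀ i : Nat, v.getD i 0 ≠ -1 →
        (xs.foldl (bfsVisitL c) (v, g ++ l)).1.getD i 0 = v.getD i 0) ∧
      (∀ x ∈ (xs.foldl pvMarkL (seen, l)).2, x ∈ l ∨
        (0 ≤ x ∧ x ≤ 100000 ∧ (xs.foldl (bfsVisitL c) (v, g ++ l)).1.getD x.toNat 0 = step + 1)) ∧
      (xs.foldl pvMarkL (seen, l)).2.length + pvCnt (xs.foldl (bfsVisitL c) (v, g ++ l)).1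
        = l.length + pvCnt v := by
  intro xs
  induction xs with
  | nil =>
    intro v seen g l hrel hsubl hvc
    exact ⟨rfl, hrel, hsubl, fun i h => rfl, fun x hx => Or.inl hx, rfl⟩
  | cons x xs ih =>
    intro v seen g l hrel hsubl hvc
    obtain ⟨hv1, hiff⟩ := hrel
    by_cases hc : 0 ≤ x ∧ x ≤ 100000 ∧ v.getD x.toNat 0 = -1
    · obtain ⟨hx0, hx1, hxv⟩ := hc
      have hxlt : x.toNat < 100001 := by omega
      have hxc : ((x.toNat : Nat) : Int) = x := Int.toNat_of_nonneg hx0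
      have hxse : ¬ x ∈ seen := by
        have h := hiff x.toNat hxlt
        rw [hxc] at h
        exact fun hm => (h.mp hm) hxv
      have hxl : ¬ x ∈ l := fun hm => hxse (hsubl x hm)
      have hcondB : 0 ≤ x ∧ x ≤ 100000 ∧ ¬ x ∈ seen := ⟨hx0, hx1, hxse⟩
      have hA : bfsVisitL c (v, g ++ l) x
          = (v.setIfInBounds x.toNat (step + 1), g ++ (l ++ [x])) := by
        simp only [bfsVisitL]
        rw [if_pos ⟨hx0, hx1, hxv⟩]
        simp [hvc, List.append_assoc]
      have hB : pvMarkL (seen, l) x = (seen ++ [x], l ++ [x]) := by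
        simp only [pvMarkL]
        rw [if_pos hcondB, pv_add_of_not_mem seen x hxse, pv_add_of_not_mem l x hxl]
      have hrel1 : pvRel (v.setIfInBounds x.toNat (step + 1)) (seen ++ [x]) := by
        refine ⟨by simp [hv1], ?_⟩
        intro i hi
        by_cases hix : x.toNat = i
        · subst hix
          rw [pv_getD_set_self _ _ _ _ (by omega), hxc]
          simp only [List.mem_append, List.mem_singleton]
          constructor
          · intro _; omega
          · intro _; exact Or.inr trivial
        · rw [pv_getD_set_ne _ _ _ _ _ hix]
          have hne : ¬ (i : Int) = x := by
            intro hEq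
            apply hix
            omega
          simp only [List.mem_append, List.mem_singleton]
          constructor
          · rintro (h | h)
            · exact (hiff i hi).mp h
            · exact absurd h hne
          · intro h
            exact Or.inl ((hiff i hi).mpr h)
      have hsub1 : ∀ z, z ∈ l ++ [x] → z ∈ seen ++ [x] := by
        intro z hz
        rcases List.mem_append.mp hz with h | h
        · exact List.mem_append.mpr (Or.inl (hsubl z h))
        · exact List.mem_append.mpr (Or.inr h)
      have hvc1 : (v.setIfInBounds x.toNat (step + 1)).getD c.toNat 0 = step := by
        by_cases hcx : x.toNat = c.toNat
        · rw [hcx] at hxv; rw [hxv] at hvc; omega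
        · rw [pv_getD_set_ne _ _ _ _ _ hcx]; exact hvc
      obtain ⟨e2, erel, esub, epres, ememb, ecnt⟩ :=
        ih (v.setIfInBounds x.toNat (step + 1)) (seen ++ [x]) g (l ++ [x]) hrel1 hsub1 hvc1
      simp only [List.foldl_cons, hA, hB]
      have hself : (v.setIfInBounds x.toNat (step + 1)).getD x.toNat 0 = step + 1 :=
        pv_getD_set_self _ _ _ _ (by omega)
      refine ⟨e2, erel, esub, ?_, ?_, ?_⟩
      · intro i hne
        have hix : x.toNat ≠ i := by
          intro h; rw [h] at hxv; exact hne hxv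
        have h1 : (v.setIfInBounds x.toNat (step + 1)).getD i 0 = v.getD i 0 :=
          pv_getD_set_ne _ _ _ _ _ hix
        rw [epres i (by rw [h1]; exact hne), h1]
      · intro y hy
        rcases ememb y hy with hin | hprops
        · rcases List.mem_append.mp hin with h | h
          · exact Or.inl h
          · have hyx : y = x := by simpa using h
            subst hyx
            refine Or.inr ⟨hx0, hx1, ?_⟩
            rw [epres y.toNat (by rw [hself]; omega), hself]
        · exact Or.inr hprops
      · have hcs : pvCnt (v.setIfInBounds x.toNat (step + 1)) + 1 = pvCnt v :=
          pv_cnt_set v x.toNat (step + 1) (by omega) hxv (by omega)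
        simp only [List.length_append, List.length_cons, List.length_nil] at ecnt ⊢
        omega
    · have hcondB : ¬ (0 ≤ x ∧ x ≤ 100000 ∧ ¬ x ∈ seen) := by
        intro h
        apply hc
        refine ⟨h.1, h.2.1, ?_⟩
        have hxlt : x.toNat < 100001 := by omega
        have hxc : ((x.toNat : Nat) : Int) = x := Int.toNat_of_nonneg h.1
        have hx := hiff x.toNat hxlt
        rw [hxc] at hx
        by_contra hne
        exact h.2.2 (hx.mpr hne)
      have hA : bfsVisitL c (v, g ++ l) x = (v, g ++ l) := by
        simp only [bfsVisitL]; rw [if_neg hc]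
      have hB : pvMarkL (seen, l) x = (seen, l) := by
        simp only [pvMarkL]; rw [if_neg hcondB]
      simp only [List.foldl_cons, hA, hB]
      exact ih v seen g l ⟨hv1, hiff⟩ hsubl hvc

-- A's loop run through one whole BFS level equals the level loop's level expansion.
theorem pv_level (k step : Int) (hstep : 0 ≤ step) :
    ∀ (f : List Int) (v : Array Int) (seen l : List Int) (fuel : Nat),
      pvRel v seen → (∀ x, x ∈ l → x ∈ seen) →
      (∀ x ∈ f, 0 ≤ x ∧ x ≤ 100000 ∧ v.getD x.toNat 0 = step) →
      (k ∈ f → bfsLoopL k (f.length + fuel) (f ++ l) v = step) ∧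
      (¬ k ∈ f → ∃ v',
        bfsLoopL k (f.length + fuel) (f ++ l) v
          = bfsLoopL k fuel (f.foldl (fun s y => (nbrF y).foldl pvMarkL s) (seen, l)).2 v' ∧
        pvRel v' (f.foldl (fun s y => (nbrF y).foldl pvMarkL s) (seen, l)).1 ∧
        (∀ x, x ∈ (f.foldl (fun s y => (nbrF y).foldl pvMarkL s) (seen, l)).2 →
          x ∈ (f.foldl (fun s y => (nbrF y).foldl pvMarkL s) (seen, l)).1) ∧
        (∀ i : Nat, v.getD i 0 ≠ -1 → v'.getD i 0 = v.getD i 0) ∧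
        (∀ x ∈ (f.foldl (fun s y => (nbrF y).foldl pvMarkL s) (seen, l)).2, x ∈ l ∨
          (0 ≤ x ∧ x ≤ 100000 ∧ v'.getD x.toNat 0 = step + 1)) ∧
        (f.foldl (fun s y => (nbrF y).foldl pvMarkL s) (seen, l)).2.length + pvCnt v'
          = l.length + pvCnt v) := by
  intro f
  induction f with
  | nil =>
    intro v seen l fuel hrel hsubl hinv
    refine ⟨by intro h; simp at h, fun _ => ⟨v, by simp, hrel, hsubl, fun i h => rfl,
      fun x hx => Or.inl hx, rfl⟩⟩
  | cons c f' ih =>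
    intro v seen l fuel hrel hsubl hinv
    have hlen : (c :: f').length + fuel = (f'.length + fuel) + 1 := by
      simp only [List.length_cons]; omega
    obtain ⟨hc0, hc1, hcv⟩ := hinv c (by simp)
    have hinv' : ∀ x ∈ f', 0 ≤ x ∧ x ≤ 100000 ∧ v.getD x.toNat 0 = step :=
      fun x hx => hinv x (by simp [hx])
    by_cases hck : c = k
    · subst hck
      refine ⟨?_, ?_⟩
      · intro _
        rw [hlen]
        simp only [List.cons_append, bfsLoopL, if_pos]
        exact hcv
      · intro hfalse
        simp at hfalse
    · have hfold : (c :: f').foldl (fun s y => (nbrF y).foldl pvMarkL s) (seen, l)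
          = f'.foldl (fun s y => (nbrF y).foldl pvMarkL s)
              ([c - 1, c + 1, c * 2].foldl pvMarkL (seen, l)) := by
        simp only [List.foldl_cons]
        rfl
      have hstepA : bfsLoopL k ((c :: f').length + fuel) ((c :: f') ++ l) v
          = bfsLoopL k (f'.length + fuel)
              ([c - 1, c + 1, c * 2].foldl (bfsVisitL c) (v, f' ++ l)).2
              ([c - 1, c + 1, c * 2].foldl (bfsVisitL c) (v, f' ++ l)).1 := by
        rw [hlen]
        simp only [List.cons_append, bfsLoopL, if_neg hck]
      obtain ⟨e2, erel, esub, epres, ememb, ecnt⟩ :=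
        pv_pairFold step c hstep [c - 1, c + 1, c * 2] v seen f' l ⟨hrel.1, hrel.2⟩ hsubl hcv
      have hinv2 : ∀ x ∈ f', 0 ≤ x ∧ x ≤ 100000 ∧
          ([c - 1, c + 1, c * 2].foldl (bfsVisitL c) (v, f' ++ l)).1.getD x.toNat 0 = step := by
        intro x hx
        obtain ⟨h0, h1, h2⟩ := hinv' x hx
        refine ⟨h0, h1, ?_⟩
        rw [epres x.toNat (by rw [h2]; omega), h2]
      obtain ⟨ih1, ih2⟩ :=
        ih ([c - 1, c + 1, c * 2].foldl (bfsVisitL c) (v, f' ++ l)).1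
          ([c - 1, c + 1, c * 2].foldl pvMarkL (seen, l)).1
          ([c - 1, c + 1, c * 2].foldl pvMarkL (seen, l)).2 fuel erel esub hinv2
      refine ⟨?_, ?_⟩
      · intro htrue
        have hk' : k ∈ f' := by
          rcases List.mem_cons.mp htrue with h | h
          · exact absurd h.symm hck
          · exact h
        rw [hstepA, e2]
        exact ih1 hk'
      · intro hfalse
        have hk' : ¬ k ∈ f' := by
          intro h
          exact hfalse (List.mem_cons.mpr (Or.inr h))
        obtain ⟨v', hA', hrel', hsub', hpres', hmemb', hcnt'⟩ := ih2 hk'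
        refine ⟨v', ?_, by rw [hfold]; exact hrel', by rw [hfold]; exact hsub', ?_, ?_, ?_⟩
        · rw [hstepA, e2, hA', hfold]
        · intro i hne
          have h1 := epres i hne
          rw [hpres' i (by rw [h1]; exact hne), h1]
        · intro y hy
          rw [hfold] at hy
          rcases hmemb' y hy with hin | hprops
          · rcases ememb y hin with hl | hp
            · exact Or.inl hl
            · refine Or.inr ⟨hp.1, hp.2.1, ?_⟩
              rw [hpres' y.toNat (by rw [hp.2.2]; omega), hp.2.2]
          · exact Or.inr hprops
        · rw [hfold]
          simp only [Prod.mk.eta] at hcnt'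
          omega

-- The deque loop agrees with the generic level loop whenever both fuels dominate the measure.
theorem pv_main (k : Int) :
    ∀ (fB : Nat) (f : List Int) (v : Array Int) (seen : List Int) (step : Int) (fA : Nat),
      pvRel v seen → 0 ≤ step →
      (∀ x ∈ f, 0 ≤ x ∧ x ≤ 100000 ∧ v.getD x.toNat 0 = step) →
      pvM v f ≤ fA → pvM v f ≤ fB →
      bfsLoopL k fA f v = levelLoopL nbrF k fB f seen step := by
  intro fB
  induction fB with
  | zero =>
    intro f v seen step fA hrel hstep hinv hfA hfB
    have hf : f = [] := by
      have := hfB; unfold pvM at this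
      cases f with
      | nil => rfl
      | cons a b => simp at this
    subst hf
    rw [pv_loopA_nil]
    rfl
  | succ fB ih =>
    intro f v seen step fA hrel hstep hinv hfA hfB
    cases f with
    | nil => rw [pv_loopA_nil]; rfl
    | cons c f' =>
      have hflen : (c :: f').length ≤ fA := by unfold pvM at hfA; omega
      have hfa : fA = (c :: f').length + (fA - (c :: f').length) := by omega
      obtain ⟨lev1, lev2⟩ :=
        pv_level k step hstep (c :: f') v seen [] (fA - (c :: f').length) hrel
          (by intro x hx; simp at hx) hinv
      rw [List.append_nil] at lev1 lev2
      by_cases hc : k ∈ c :: f'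
      · rw [hfa, lev1 hc]
        show _ = levelLoopL nbrF k (fB + 1) (c :: f') seen step
        simp only [levelLoopL]
        rw [if_pos hc]
      · obtain ⟨v', hA', hrel', hsub', _hpres', hmemb', hcnt'⟩ := lev2 hc
        rw [hfa, hA']
        have hB' : levelLoopL nbrF k (fB + 1) (c :: f') seen step
            = levelLoopL nbrF k fB
                ((c :: f').foldl (fun s y => (nbrF y).foldl pvMarkL s) (seen, [])).2
                ((c :: f').foldl (fun s y => (nbrF y).foldl pvMarkL s) (seen, [])).1
                (step + 1) := by
          simp only [levelLoopL]
          rw [if_neg hc]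
        rw [hB']
        have hinv2 : ∀ x ∈ ((c :: f').foldl (fun s y => (nbrF y).foldl pvMarkL s) (seen, [])).2,
            0 ≤ x ∧ x ≤ 100000 ∧ v'.getD x.toNat 0 = step + 1 := by
          intro x hx
          rcases hmemb' x hx with h | h
          · simp at h
          · exact h
        have hcnt'' : ((c :: f').foldl (fun s y => (nbrF y).foldl pvMarkL s) (seen, [])).2.length
            + pvCnt v' = pvCnt v := by
          simpa using hcnt'
        apply ih _ v' _ (step + 1) (fA - (c :: f').length) hrel' (by omega) hinv2
        · unfold pvM
          unfold pvM at hfA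
          omega
        · unfold pvM
          unfold pvM at hfB
          simp only [List.length_cons] at hfB ⊢
          omega

-- ----- semantic layer: walks of a given length through in-range candidate moves -----

-- pvSteps nbr s a b: b is reachable from a in exactly s moves, each landing in [0,100000].
def pvSteps (nbr : Int → List Int) : Nat → Int → Int → Prop
  | 0, a, b => b = a
  | s + 1, a, b => ∃ c, pvSteps nbr s a c ∧ b ∈ nbr c ∧ 0 ≤ b ∧ b ≤ 100000

theorem pv_steps_end_range (nbr : Int → List Int) (s : Nat) (a c : Int)
    (ha0 : 0 ≤ a) (ha1 : a ≤ 100000) (h : pvSteps nbr s a c) : 0 ≤ c ∧ c ≤ 100000 := by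
  cases s with
  | zero => simp only [pvSteps] at h; omega
  | succ t => obtain ⟨y, _, _, h0, h1⟩ := h; exact ⟨h0, h1⟩

theorem pv_steps_cons (nbr : Int → List Int) :
    ∀ (s : Nat) (a b c : Int), c ∈ nbr a → 0 ≤ c → c ≤ 100000 →
      pvSteps nbr s c b → pvSteps nbr (s + 1) a b := by
  intro s
  induction s with
  | zero =>
    intro a b c hm h0 h1 hs
    simp only [pvSteps] at hs
    subst hs
    exact ⟨a, rfl, hm, h0, h1⟩
  | succ t ih =>
    intro a b c hm h0 h1 hs
    obtain ⟨y, hy, hmy, hy0, hy1⟩ := hs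
    exact ⟨y, ih a y c hm h0 h1 hy, hmy, hy0, hy1⟩

theorem pv_steps_trans (nbr : Int → List Int) :
    ∀ (t s : Nat) (a b c : Int), pvSteps nbr s a b → pvSteps nbr t b c →
      pvSteps nbr (s + t) a c := by
  intro t
  induction t with
  | zero =>
    intro s a b c h1 h2
    simp only [pvSteps] at h2
    subst h2
    exact h1
  | succ u ih =>
    intro s a b c h1 h2
    obtain ⟨y, hy, hm, h0, hb⟩ := h2
    exact ⟨y, ih s a b y h1 hy, hm, h0, hb⟩

theorem pv_steps_rev (nbr1 nbr2 : Int → List Int)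
    (hflip : ∀ b c : Int, 0 ≤ b → b ≤ 100000 → 0 ≤ c → c ≤ 100000 → b ∈ nbr1 c → c ∈ nbr2 b) :
    ∀ (s : Nat) (a b : Int), 0 ≤ a → a ≤ 100000 →
      pvSteps nbr1 s a b → pvSteps nbr2 s b a := by
  intro s
  induction s with
  | zero =>
    intro a b ha0 ha1 h
    simp only [pvSteps] at h ⊢
    omega
  | succ t ih =>
    intro a b ha0 ha1 h
    obtain ⟨c, hc, hm, hb0, hb1⟩ := h
    obtain ⟨hc0, hc1⟩ := pv_steps_end_range nbr1 t a c ha0 ha1 hc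
    exact pv_steps_cons nbr2 t b a c (hflip b c hb0 hb1 hc0 hc1 hm) hc0 hc1 (ih a c ha0 ha1 hc)

theorem pv_nbrB_mem (b c : Int) :
    c ∈ nbrB b ↔ (c = b - 1 ∨ c = b + 1 ∨ (b % 2 = 0 ∧ c = b / 2)) := by
  unfold nbrB
  rw [PySem.Int.mod_eq_emod_of_pos (b := 2) (by omega),
    PySem.Int.floordiv_eq_ediv_of_pos (b := 2) (by omega)]
  by_cases hmod : b % 2 = 0
  · simp [hmod]
  · simp [hmod]

theorem pv_flipFB (b c : Int) (hb0 : 0 ≤ b) (hb1 : b ≤ 100000) (hc0 : 0 ≤ c)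
    (hc1 : c ≤ 100000) (h : b ∈ nbrF c) : c ∈ nbrB b := by
  simp only [nbrF, List.mem_cons, List.not_mem_nil, or_false] at h
  rw [pv_nbrB_mem]
  omega

theorem pv_flipBF (b c : Int) (hb0 : 0 ≤ b) (hb1 : b ≤ 100000) (hc0 : 0 ≤ c)
    (hc1 : c ≤ 100000) (h : c ∈ nbrB b) : b ∈ nbrF c := by
  rw [pv_nbrB_mem] at h
  simp only [nbrF, List.mem_cons, List.not_mem_nil, or_false]
  omega

theorem pv_pred (nbr : Int → List Int) (start : Int) (t : Nat) (x : Int)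
    (h : pvSteps nbr (t + 1) start x) (hmin : ∀ u < t + 1, ¬ pvSteps nbr u start x) :
    ∃ y, pvSteps nbr t start y ∧ (∀ u < t, ¬ pvSteps nbr u start y) ∧
      x ∈ nbr y ∧ 0 ≤ x ∧ x ≤ 100000 := by
  obtain ⟨y, hy, hm, h0, h1⟩ := h
  refine ⟨y, hy, ?_, hm, h0, h1⟩
  intro u hu hsy
  exact hmin (u + 1) (by omega) ⟨y, hsy, hm, h0, h1⟩

theorem pv_layer_nonempty (nbr : Int → List Int) (start tgt : Int) (m : Nat)
    (h : pvSteps nbr m start tgt) (hmin : ∀ u < m, ¬ pvSteps nbr u start tgt) :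
    ∀ t ≤ m, ∃ x, pvSteps nbr t start x ∧ ∀ u < t, ¬ pvSteps nbr u start x := by
  have aux : ∀ j, j ≤ m → ∃ x, pvSteps nbr (m - j) start x ∧
      ∀ u < m - j, ¬ pvSteps nbr u start x := by
    intro j
    induction j with
    | zero => intro _; exact ⟨tgt, by simpa using h, by simpa using hmin⟩
    | succ i ihj =>
      intro hij
      obtain ⟨x, hx, hxmin⟩ := ihj (by omega)
      have he : m - i = (m - (i + 1)) + 1 := by omega
      rw [he] at hx hxmin
      obtain ⟨y, hy, hymin, _, _, _⟩ := pv_pred nbr start (m - (i + 1)) x hx hxmin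
      exact ⟨y, hy, hymin⟩
  intro t ht
  have := aux (m - t) (by omega)
  rw [Nat.sub_sub_self ht] at this
  exact this

theorem pv_prop1 (A M Lp R1 R2 : Prop) (h : M → R1 ∧ R2 ∧ ¬A) :
    ((A ∨ M) ∨ (Lp ∧ R1 ∧ R2 ∧ ¬(A ∨ M))) ↔ (A ∨ ((M ∨ Lp) ∧ R1 ∧ R2 ∧ ¬A)) := by tauto
theorem pv_prop2 (A N M Lp R1 R2 : Prop) (hM : M → R1 ∧ R2 ∧ ¬A) (hN : N → A) :
    ((N ∨ M) ∨ (Lp ∧ R1 ∧ R2 ∧ ¬(A ∨ M))) ↔ (N ∨ ((M ∨ Lp) ∧ R1 ∧ R2 ∧ ¬A)) := by tauto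
theorem pv_prop3 (A M Lp R1 R2 : Prop) (h : M → R1 → R2 → A) :
    (A ∨ (Lp ∧ R1 ∧ R2 ∧ ¬A)) ↔ (A ∨ ((M ∨ Lp) ∧ R1 ∧ R2 ∧ ¬A)) := by tauto
theorem pv_prop4 (A N M Lp R1 R2 : Prop) (hM : M → R1 → R2 → A) :
    (N ∨ (Lp ∧ R1 ∧ R2 ∧ ¬A)) ↔ (N ∨ ((M ∨ Lp) ∧ R1 ∧ R2 ∧ ¬A)) := by tauto
theorem pv_prop5 (A Ny E R1 R2 : Prop) :
    ((A ∨ (Ny ∧ R1 ∧ R2 ∧ ¬A)) ∨ (E ∧ R1 ∧ R2 ∧ ¬(A ∨ (Ny ∧ R1 ∧ R2 ∧ ¬A))))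
      ↔ (A ∨ ((Ny ∨ E) ∧ R1 ∧ R2 ∧ ¬A)) := by tauto
theorem pv_prop6 (A N Ny E R1 R2 : Prop) (hN : N → A) :
    ((N ∨ (Ny ∧ R1 ∧ R2 ∧ ¬A)) ∨ (E ∧ R1 ∧ R2 ∧ ¬(A ∨ (Ny ∧ R1 ∧ R2 ∧ ¬A))))
      ↔ (N ∨ ((Ny ∨ E) ∧ R1 ∧ R2 ∧ ¬A)) := by tauto

-- characterization of the inner mark fold over one candidate list
theorem pv_markChar :
    ∀ (L : List Int) (se nx : List Int), (∀ x, x ∈ nx → x ∈ se) →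
      ∀ x, (x ∈ (L.foldl pvMarkL (se, nx)).1 ↔
              x ∈ se ∨ (x ∈ L ∧ 0 ≤ x ∧ x ≤ 100000 ∧ ¬ x ∈ se)) ∧
           (x ∈ (L.foldl pvMarkL (se, nx)).2 ↔
              x ∈ nx ∨ (x ∈ L ∧ 0 ≤ x ∧ x ≤ 100000 ∧ ¬ x ∈ se)) := by
  intro L
  induction L with
  | nil => intro se nx _ x; simp
  | cons m L ih =>
    intro se nx hsub x
    by_cases hm : 0 ≤ m ∧ m ≤ 100000 ∧ ¬ m ∈ se
    · have hnx : ¬ m ∈ nx := fun h => hm.2.2 (hsub m h)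
      have hstep : pvMarkL (se, nx) m = (se ++ [m], nx ++ [m]) := by
        simp only [pvMarkL]
        rw [if_pos hm, pv_add_of_not_mem se m hm.2.2, pv_add_of_not_mem nx m hnx]
      have hsub' : ∀ z, z ∈ nx ++ [m] → z ∈ se ++ [m] := by
        intro z hz
        rcases List.mem_append.mp hz with h | h
        · exact List.mem_append.mpr (Or.inl (hsub z h))
        · exact List.mem_append.mpr (Or.inr h)
      obtain ⟨h1, h2⟩ := ih (se ++ [m]) (nx ++ [m]) hsub' x
      simp only [List.foldl_cons, hstep]
      simp only [List.mem_append, List.mem_cons, List.not_mem_nil, or_false] at h1 h2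
      have hM : x = m → 0 ≤ x ∧ x ≤ 100000 ∧ ¬ x ∈ se := by
        intro h; subst h; exact hm
      constructor
      · rw [h1]
        simp only [List.mem_cons]
        exact pv_prop1 (x ∈ se) (x = m) (x ∈ L) _ _ hM
      · rw [h2]
        simp only [List.mem_cons]
        exact pv_prop2 (x ∈ se) (x ∈ nx) (x = m) (x ∈ L) _ _ hM (hsub x)
    · have hstep : pvMarkL (se, nx) m = (se, nx) := by
        simp only [pvMarkL]; rw [if_neg hm]
      obtain ⟨h1, h2⟩ := ih se nx hsub x
      simp only [List.foldl_cons, hstep]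
      have hM : x = m → 0 ≤ x → x ≤ 100000 → x ∈ se := by
        intro h h0 h1'
        subst h
        by_contra hcon
        exact hm ⟨h0, h1', hcon⟩
      constructor
      · rw [h1]
        simp only [List.mem_cons]
        exact pv_prop3 (x ∈ se) (x = m) (x ∈ L) _ _ hM
      · rw [h2]
        simp only [List.mem_cons]
        exact pv_prop4 (x ∈ se) (x ∈ nx) (x = m) (x ∈ L) _ _ hM

-- characterization of one whole level expansion
theorem pv_levelChar (nbr : Int → List Int) :
    ∀ (f : List Int) (se nx : List Int), (∀ x, x ∈ nx → x ∈ se) →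
      ∀ x, (x ∈ (f.foldl (fun s y => (nbr y).foldl pvMarkL s) (se, nx)).1 ↔
              x ∈ se ∨ ((∃ y ∈ f, x ∈ nbr y) ∧ 0 ≤ x ∧ x ≤ 100000 ∧ ¬ x ∈ se)) ∧
           (x ∈ (f.foldl (fun s y => (nbr y).foldl pvMarkL s) (se, nx)).2 ↔
              x ∈ nx ∨ ((∃ y ∈ f, x ∈ nbr y) ∧ 0 ≤ x ∧ x ≤ 100000 ∧ ¬ x ∈ se)) := by
  intro f
  induction f with
  | nil => intro se nx _ x; simp
  | cons y f ih =>
    intro se nx hsub x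
    have hmc := pv_markChar (nbr y) se nx hsub
    have hsub' : ∀ z, z ∈ ((nbr y).foldl pvMarkL (se, nx)).2 →
        z ∈ ((nbr y).foldl pvMarkL (se, nx)).1 := by
      intro z hz
      rcases (hmc z).2.mp hz with h | h
      · exact (hmc z).1.mpr (Or.inl (hsub z h))
      · exact (hmc z).1.mpr (Or.inr h)
    obtain ⟨hih1, hih2⟩ :=
      ih ((nbr y).foldl pvMarkL (se, nx)).1 ((nbr y).foldl pvMarkL (se, nx)).2 hsub' x
    simp only [Prod.mk.eta] at hih1 hih2
    obtain ⟨hA, hB⟩ := hmc x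
    simp only [List.foldl_cons]
    constructor
    · rw [hih1, hA]
      simp only [List.mem_cons, exists_eq_or_imp]
      exact pv_prop5 (x ∈ se) (x ∈ nbr y) (∃ z ∈ f, x ∈ nbr z) _ _
    · rw [hih2, hB, hA]
      simp only [List.mem_cons, exists_eq_or_imp]
      exact pv_prop6 (x ∈ se) (x ∈ nx) (x ∈ nbr y) (∃ z ∈ f, x ∈ nbr z) _ _ (hsub x)

-- the level loop returns the least number of moves from start to tgt
theorem pv_levelCorrect (nbr : Int → List Int) (start tgt : Int) :
    ∀ (r : Nat), ∀ (fuel s : Nat) (f seen : List Int),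
      (∀ x, x ∈ f ↔ (pvSteps nbr s start x ∧ ∀ t < s, ¬ pvSteps nbr t start x)) →
      (∀ x, x ∈ seen ↔ ∃ t, t ≤ s ∧ pvSteps nbr t start x) →
      pvSteps nbr (s + r) start tgt →
      (∀ t < s + r, ¬ pvSteps nbr t start tgt) →
      r < fuel →
      levelLoopL nbr tgt fuel f seen (s : Int) = ((s + r : Nat) : Int) := by
  intro r
  induction r with
  | zero =>
    intro fuel s f seen hf hseen hst hmin hfuel
    have htgt : tgt ∈ f := (hf tgt).mpr ⟨by simpa using hst, by simpa using hmin⟩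
    cases f with
    | nil => simp at htgt
    | cons c f' =>
      cases fuel with
      | zero => omega
      | succ fu =>
        simp only [levelLoopL]
        rw [if_pos htgt]
        simp
  | succ r ih =>
    intro fuel s f seen hf hseen hst hmin hfuel
    have hnotin : ¬ tgt ∈ f := by
      intro h
      exact (hmin s (by omega)) ((hf tgt).mp h).1
    obtain ⟨x0, hx0, hx0min⟩ :=
      pv_layer_nonempty nbr start tgt (s + (r + 1)) hst hmin s (by omega)
    have hx0f : x0 ∈ f := (hf x0).mpr ⟨hx0, hx0min⟩
    cases f with
    | nil => simp at hx0f
    | cons c f' =>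
      cases fuel with
      | zero => omega
      | succ fu =>
        simp only [levelLoopL]
        rw [if_neg hnotin]
        have hchar := pv_levelChar nbr (c :: f') seen []
          (by intro z hz; simp at hz)
        have hf' : ∀ x, x ∈ ((c :: f').foldl (fun s y => (nbr y).foldl pvMarkL s) (seen, [])).2 ↔
            (pvSteps nbr (s + 1) start x ∧ ∀ t < s + 1, ¬ pvSteps nbr t start x) := by
          intro x
          rw [(hchar x).2]
          simp only [List.not_mem_nil, false_or]
          constructor
          · rintro ⟨⟨y, hyf, hxy⟩, h0, h1, hnse⟩
            have hy := (hf y).mp hyf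
            refine ⟨⟨y, hy.1, hxy, h0, h1⟩, ?_⟩
            intro t ht hstx
            exact hnse ((hseen x).mpr ⟨t, by omega, hstx⟩)
          · rintro ⟨hs1, hmin1⟩
            obtain ⟨y, hy, hymin, hxy, h0, h1⟩ := pv_pred nbr start s x hs1 hmin1
            refine ⟨⟨y, (hf y).mpr ⟨hy, hymin⟩, hxy⟩, h0, h1, ?_⟩
            intro hcon
            obtain ⟨t, ht, hstx⟩ := (hseen x).mp hcon
            exact hmin1 t (by omega) hstx
        have hseen' : ∀ x, x ∈ ((c :: f').foldl (fun s y => (nbr y).foldl pvMarkL s) (seen, [])).1 ↔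
            ∃ t, t ≤ s + 1 ∧ pvSteps nbr t start x := by
          intro x
          rw [(hchar x).1]
          constructor
          · rintro (h | h)
            · obtain ⟨t, ht, hstx⟩ := (hseen x).mp h
              exact ⟨t, by omega, hstx⟩
            · have hmem : x ∈ ((c :: f').foldl (fun s y => (nbr y).foldl pvMarkL s) (seen, [])).2 :=
                (hchar x).2.mpr (Or.inr h)
              obtain ⟨hs1, _⟩ := (hf' x).mp hmem
              exact ⟨s + 1, le_refl _, hs1⟩
          · rintro ⟨t, ht, hstx⟩
            by_cases hcse : x ∈ seen
            · exact Or.inl hcse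
            · right
              have hnost : ∀ u, u ≤ s → ¬ pvSteps nbr u start x := by
                intro u hu hs'
                exact hcse ((hseen x).mpr ⟨u, hu, hs'⟩)
              have ht1 : t = s + 1 := by
                rcases Nat.lt_or_ge t (s + 1) with h' | h'
                · exact absurd hstx (hnost t (by omega))
                · omega
              subst ht1
              have hlay : x ∈ ((c :: f').foldl (fun s y => (nbr y).foldl pvMarkL s) (seen, [])).2 :=
                (hf' x).mpr ⟨hstx, fun u hu => hnost u (by omega)⟩
              have := (hchar x).2.mp hlay
              simpa using this
        have hst' : pvSteps nbr ((s + 1) + r) start tgt := by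
          have he : (s + 1) + r = s + (r + 1) := by omega
          rw [he]
          exact hst
        have hmin' : ∀ t < (s + 1) + r, ¬ pvSteps nbr t start tgt := by
          intro t ht
          exact hmin t (by omega)
        have hcast : (s : Int) + 1 = ((s + 1 : Nat) : Int) := by push_cast; ring
        rw [hcast, ih fu (s + 1) _ _ hf' hseen' hst' hmin' (by omega)]
        congr 1
        omega

theorem pv_descend : ∀ a : Nat, a ≤ 100000 → pvSteps nbrF a ((a : Nat) : Int) 0 := by
  intro a
  induction a with
  | zero => intro _; simp [pvSteps]
  | succ b ih =>
    intro hb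
    apply pv_steps_cons nbrF b ((b + 1 : Nat) : Int) 0 ((b : Nat) : Int)
    · simp only [nbrF, List.mem_cons, List.not_mem_nil, or_false]
      left
      push_cast
      ring
    · omega
    · exact_mod_cast Nat.le_of_succ_le hb
    · exact ih (by omega)

theorem pv_ascend : ∀ b : Nat, b ≤ 100000 → pvSteps nbrF b 0 ((b : Nat) : Int) := by
  intro b
  induction b with
  | zero => intro _; simp [pvSteps]
  | succ a ih =>
    intro ha
    refine ⟨((a : Nat) : Int), ih (by omega), ?_, by push_cast; omega, by push_cast; omega⟩
    simp only [nbrF, List.mem_cons, List.not_mem_nil, or_false]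
    right; left
    push_cast
    ring


-- ----- bridges: the array-state ports equal their list-state twins -----

theorem pv_bridgeVisit (c : Int) :
    ∀ (xs : List Int) (v q : Array Int) (i : Nat), i ≤ q.size →
      (xs.foldl (bfsVisitA c) (v, q)).1 = (xs.foldl (bfsVisitL c) (v, q.toList.drop i)).1 ∧
      (xs.foldl (bfsVisitA c) (v, q)).2.toList.drop i
        = (xs.foldl (bfsVisitL c) (v, q.toList.drop i)).2 ∧
      i ≤ (xs.foldl (bfsVisitA c) (v, q)).2.size := by
  intro xs
  induction xs with
  | nil => intro v q i hi; exact ⟨rfl, rfl, hi⟩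
  | cons x xs ih =>
    intro v q i hi
    by_cases hc : 0 ≤ x ∧ x ≤ 100000 ∧ v.getD x.toNat 0 = -1
    · have hA : bfsVisitA c (v, q) x
          = (v.setIfInBounds x.toNat (v.getD c.toNat 0 + 1), q.push x) := by
        simp only [bfsVisitA]; rw [if_pos hc]
      have hL : bfsVisitL c (v, q.toList.drop i) x
          = (v.setIfInBounds x.toNat (v.getD c.toNat 0 + 1), q.toList.drop i ++ [x]) := by
        simp only [bfsVisitL]; rw [if_pos hc]
      have hpush : (q.push x).toList.drop i = q.toList.drop i ++ [x] := by
        rw [Array.toList_push, List.drop_append_of_le_length (by simpa using hi)]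
      simp only [List.foldl_cons, hA, hL]
      have hrec := ih (v.setIfInBounds x.toNat (v.getD c.toNat 0 + 1)) (q.push x) i
        (by simp only [Array.size_push]; omega)
      rw [hpush] at hrec
      exact hrec
    · have hA : bfsVisitA c (v, q) x = (v, q) := by
        simp only [bfsVisitA]; rw [if_neg hc]
      have hL : bfsVisitL c (v, q.toList.drop i) x = (v, q.toList.drop i) := by
        simp only [bfsVisitL]; rw [if_neg hc]
      simp only [List.foldl_cons, hA, hL]
      exact ih v q i hi

theorem pv_bridgeA (k : Int) :
    ∀ (fuel i : Nat) (q v : Array Int), i ≤ q.size →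
      bfsLoopA k fuel i q v = bfsLoopL k fuel (q.toList.drop i) v := by
  intro fuel
  induction fuel with
  | zero => intro i q v hi; rfl
  | succ fuel ih =>
    intro i q v hi
    by_cases hlt : i < q.size
    · have hdrop : q.toList.drop i = q.toList[i] :: q.toList.drop (i + 1) :=
        List.drop_eq_getElem_cons (by simpa using hlt)
      have hgc : q.getD i 0 = q.toList[i] := by
        simp [Array.getD, hlt, Array.getElem_toList]
      rw [hdrop]
      simp only [bfsLoopA, bfsLoopL]
      rw [if_pos hlt, hgc]
      by_cases hck : q.toList[i] = k
      · rw [if_pos hck, if_pos hck]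
      · rw [if_neg hck, if_neg hck]
        obtain ⟨h1, h2, h3⟩ := pv_bridgeVisit (q.toList[i])
          [q.toList[i] - 1, q.toList[i] + 1, q.toList[i] * 2] v q (i + 1) (by omega)
        rw [ih (i + 1) _ _ h3, h2, h1]
    · have hnil : q.toList.drop i = [] := by
        apply List.drop_eq_nil_of_le
        simpa using Nat.le_of_not_lt hlt
      rw [hnil]
      simp only [bfsLoopA, bfsLoopL]
      rw [if_neg hlt]

-- Relation between B's Boolean seen-table and the list twin's seen-set.
def pvRelB (w : Array Bool) (se : List Int) : Prop :=
  w.size = 100001 ∧ ∀ i : Nat, i < 100001 → (w.getD i false = true ↔ (i : Int) ∈ se)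

theorem pv_getD_setB_self (a : Array Bool) (i : Nat) (x d : Bool) (h : i < a.size) :
    (a.setIfInBounds i x).getD i d = x := by
  simp [Array.getD, h]

theorem pv_getD_setB_ne (a : Array Bool) (i j : Nat) (x d : Bool) (h : i ≠ j) :
    (a.setIfInBounds i x).getD j d = a.getD j d := by
  simp only [Array.getD, Array.size_setIfInBounds]
  split
  · next hj => exact Array.getElem_setIfInBounds_ne (by simpa using hj) h
  · rfl

theorem pv_bridgeMark :
    ∀ (L : List Int) (w : Array Bool) (se : List Int) (nx : Array Int) (nl : List Int),
      pvRelB w se → nx.toList = nl → (∀ x, x ∈ nl → x ∈ se) →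
      pvRelB (L.foldl pvMark (w, nx)).1 (L.foldl pvMarkL (se, nl)).1 ∧
      (L.foldl pvMark (w, nx)).2.toList = (L.foldl pvMarkL (se, nl)).2 ∧
      (∀ x, x ∈ (L.foldl pvMarkL (se, nl)).2 → x ∈ (L.foldl pvMarkL (se, nl)).1) := by
  intro L
  induction L with
  | nil => intro w se nx nl hrel hnx hsub; exact ⟨hrel, hnx, hsub⟩
  | cons m L ih =>
    intro w se nx nl hrel hnx hsub
    obtain ⟨hw1, hiff⟩ := hrel
    by_cases hcM : 0 ≤ m ∧ m ≤ 100000 ∧ w.getD m.toNat false = false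
    · obtain ⟨hm0, hm1, hmw⟩ := hcM
      have hmlt : m.toNat < 100001 := by omega
      have hmc : ((m.toNat : Nat) : Int) = m := Int.toNat_of_nonneg hm0
      have hmiff := hiff m.toNat hmlt
      rw [hmc] at hmiff
      have hmse : ¬ m ∈ se := by
        intro hmm
        rw [hmiff.mpr hmm] at hmw
        cases hmw
      have hmnl : ¬ m ∈ nl := fun h => hmse (hsub m h)
      have hA : pvMark (w, nx) m = (w.setIfInBounds m.toNat true, nx.push m) := by
        simp only [pvMark]; rw [if_pos ⟨hm0, hm1, hmw⟩]
      have hL : pvMarkL (se, nl) m = (se ++ [m], nl ++ [m]) := by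
        simp only [pvMarkL]
        rw [if_pos ⟨hm0, hm1, hmse⟩, pv_add_of_not_mem se m hmse, pv_add_of_not_mem nl m hmnl]
      have hrel' : pvRelB (w.setIfInBounds m.toNat true) (se ++ [m]) := by
        refine ⟨by simp [hw1], ?_⟩
        intro i hi
        by_cases him : m.toNat = i
        · subst him
          rw [pv_getD_setB_self _ _ _ _ (by omega), hmc]
          simp only [List.mem_append, List.mem_singleton]
          constructor
          · intro _; exact Or.inr trivial
          · intro _; trivial
        · rw [pv_getD_setB_ne _ _ _ _ _ him]
          have hne : ¬ (i : Int) = m := by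
            intro hEq; apply him; omega
          simp only [List.mem_append, List.mem_singleton]
          constructor
          · intro h; exact Or.inl ((hiff i hi).mp h)
          · rintro (h | h)
            · exact (hiff i hi).mpr h
            · exact absurd h hne
      have hnx' : (nx.push m).toList = nl ++ [m] := by rw [Array.toList_push, hnx]
      have hsub' : ∀ x, x ∈ nl ++ [m] → x ∈ se ++ [m] := by
        intro z hz
        rcases List.mem_append.mp hz with h | h
        · exact List.mem_append.mpr (Or.inl (hsub z h))
        · exact List.mem_append.mpr (Or.inr h)
      simp only [List.foldl_cons, hA, hL]
      exact ih _ _ _ _ hrel' hnx' hsub'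
    · have hcL : ¬ (0 ≤ m ∧ m ≤ 100000 ∧ ¬ m ∈ se) := by
        intro h
        apply hcM
        refine ⟨h.1, h.2.1, ?_⟩
        have hmlt : m.toNat < 100001 := by omega
        have hmc : ((m.toNat : Nat) : Int) = m := Int.toNat_of_nonneg h.1
        have hmiff := hiff m.toNat hmlt
        rw [hmc] at hmiff
        cases hq : w.getD m.toNat false with
        | false => rfl
        | true => exact absurd (hmiff.mp hq) h.2.2
      have hA : pvMark (w, nx) m = (w, nx) := by
        simp only [pvMark]; rw [if_neg hcM]
      have hL : pvMarkL (se, nl) m = (se, nl) := by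
        simp only [pvMarkL]; rw [if_neg hcL]
      simp only [List.foldl_cons, hA, hL]
      exact ih w se nx nl ⟨hw1, hiff⟩ hnx hsub

theorem pv_bridgeLevel (nbr : Int → List Int) :
    ∀ (fl : List Int) (w : Array Bool) (se : List Int) (nx : Array Int) (nl : List Int),
      pvRelB w se → nx.toList = nl → (∀ x, x ∈ nl → x ∈ se) →
      pvRelB (fl.foldl (fun s y => (nbr y).foldl pvMark s) (w, nx)).1
             (fl.foldl (fun s y => (nbr y).foldl pvMarkL s) (se, nl)).1 ∧
      (fl.foldl (fun s y => (nbr y).foldl pvMark s) (w, nx)).2.toList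
        = (fl.foldl (fun s y => (nbr y).foldl pvMarkL s) (se, nl)).2 := by
  intro fl
  induction fl with
  | nil => intro w se nx nl hrel hnx hsub; exact ⟨hrel, hnx⟩
  | cons y fl ih =>
    intro w se nx nl hrel hnx hsub
    obtain ⟨hrel1, hnx1, hsub1⟩ := pv_bridgeMark (nbr y) w se nx nl hrel hnx hsub
    have := ih ((nbr y).foldl pvMark (w, nx)).1 ((nbr y).foldl pvMarkL (se, nl)).1
      ((nbr y).foldl pvMark (w, nx)).2 ((nbr y).foldl pvMarkL (se, nl)).2 hrel1 hnx1 hsub1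
    simp only [Prod.mk.eta] at this
    simpa only [List.foldl_cons] using this

theorem pv_bridgeB (nbr : Int → List Int) (tgt : Int) :
    ∀ (fuel : Nat) (f : Array Int) (fl : List Int) (w : Array Bool) (se : List Int) (step : Int),
      f.toList = fl → pvRelB w se →
      levelLoop nbr tgt fuel f w step = levelLoopL nbr tgt fuel fl se step := by
  intro fuel
  induction fuel with
  | zero => intro f fl w se step _ _; rfl
  | succ fuel ih =>
    intro f fl w se step hfl hrel
    cases fl with
    | nil =>
      have hsz : f.size = 0 := by
        have : f.toList.length = 0 := by rw [hfl]; rfl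
        simpa using this
      simp only [levelLoop, levelLoopL]
      rw [if_pos hsz]
    | cons c rest =>
      have hsz : ¬ f.size = 0 := by
        have : f.toList.length = rest.length + 1 := by rw [hfl]; rfl
        simp only [Array.length_toList] at this
        omega
      have hmem : tgt ∈ f ↔ tgt ∈ c :: rest := by
        rw [Array.mem_def, hfl]
      simp only [levelLoop, levelLoopL]
      rw [if_neg hsz]
      by_cases hm : tgt ∈ c :: rest
      · rw [if_pos (hmem.mpr hm), if_pos hm]
      · rw [if_neg (fun h => hm (hmem.mp h)), if_neg hm]
        obtain ⟨hrel', heq'⟩ := pv_bridgeLevel nbr (c :: rest) w se #[] []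
          hrel rfl (by intro z hz; simp at hz)
        have hfoldeq : f.foldl (fun s y => (nbr y).foldl pvMark s) (w, #[])
            = (c :: rest).foldl (fun s y => (nbr y).foldl pvMark s) (w, #[]) := by
          rw [← Array.foldl_toList, hfl]
        rw [hfoldeq]
        exact ih _ _ _ _ _ heq' hrel'

-- ===== VERDICT (by name: the statement is the Claim_ definition above) =====
theorem bfs_spec : Claim_equal_bfs := by
  intro n k _hdom hpre
  obtain ⟨hn0, hn1, hk0, hk1⟩ := hpre
  unfold Spec_bfs bfs bfs_alt
  have hnlt : n.toNat < 100001 := by omega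
  have hnc : ((n.toNat : Nat) : Int) = n := Int.toNat_of_nonneg hn0
  have hrepl : ∀ i : Nat, i < 100001 →
      (Array.replicate 100001 (-1 : Int)).getD i 0 = -1 := by
    intro i hi
    simp [Array.getD, hi]
  have hv0 : ((Array.replicate 100001 (-1 : Int)).setIfInBounds n.toNat 0).getD n.toNat 0 = 0 :=
    pv_getD_set_self _ _ _ _ (by simpa using hnlt)
  have hcnt0 : pvCnt ((Array.replicate 100001 (-1 : Int)).setIfInBounds n.toNat 0) = 100000 := by
    have := pv_cnt_set (Array.replicate 100001 (-1 : Int)) n.toNat 0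
      (by simpa using hnlt) (hrepl n.toNat hnlt) (by omega)
    have hbase : pvCnt (Array.replicate 100001 (-1 : Int)) = 100001 := by
      unfold pvCnt
      rw [Array.toList_replicate, List.count_replicate_self]
    omega
  -- A's array-state deque loop equals its list-state twin
  have hA1 : bfsLoopA k 300005 0 #[n] ((Array.replicate 100001 (-1 : Int)).setIfInBounds n.toNat 0)
      = bfsLoopL k 300005 [n] ((Array.replicate 100001 (-1 : Int)).setIfInBounds n.toNat 0) := by
    have := pv_bridgeA k 300005 0 #[n]
      ((Array.replicate 100001 (-1 : Int)).setIfInBounds n.toNat 0) (by simp)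
    simpa using this
  -- A's deque loop equals the forward level loop
  have hmain : bfsLoopL k 300005 [n] ((Array.replicate 100001 (-1 : Int)).setIfInBounds n.toNat 0)
      = levelLoopL nbrF k 200005 [n] [n] 0 := by
    apply pv_main k 200005 [n] _ [n] 0 300005 ?_ le_rfl ?_ ?_ ?_
    · refine ⟨by simp, ?_⟩
      intro i hi
      by_cases hin : n.toNat = i
      · subst hin
        rw [hv0, hnc]
        simp
      · rw [pv_getD_set_ne _ _ _ _ _ hin, hrepl i hi]
        simp only [List.mem_singleton]
        constructor
        · intro h
          exact absurd (by omega : n.toNat = i) hin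
        · intro h
          omega
    · intro x hx
      have hxn : x = n := by simpa using hx
      subst hxn
      exact ⟨hn0, hn1, hv0⟩
    · unfold pvM
      rw [hcnt0]
      simp
    · unfold pvM
      rw [hcnt0]
      simp
  -- a forward walk from n to k exists
  have hw : pvSteps nbrF (n.toNat + k.toNat) n k := by
    have h1 := pv_descend n.toNat (by omega)
    have h2 := pv_ascend k.toNat (by omega)
    rw [hnc] at h1
    rw [Int.toNat_of_nonneg hk0] at h2
    exact pv_steps_trans nbrF k.toNat n.toNat n 0 k h1 h2
  haveI : DecidablePred fun t => pvSteps nbrF t n k := fun _ => Classical.propDecidable _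
  have hex : ∃ t, pvSteps nbrF t n k := ⟨n.toNat + k.toNat, hw⟩
  have hr : pvSteps nbrF (Nat.find hex) n k := Nat.find_spec hex
  have hminr : ∀ t < Nat.find hex, ¬ pvSteps nbrF t n k := fun t ht => Nat.find_min hex ht
  have hrle : Nat.find hex ≤ n.toNat + k.toNat := Nat.find_min' hex hw
  -- common initial invariants for a singleton start
  have hf0 : ∀ (start : Int) (x : Int) (nbr : Int → List Int), x ∈ [start] ↔
      (pvSteps nbr 0 start x ∧ ∀ t < 0, ¬ pvSteps nbr t start x) := by
    intro start x nbr
    simp only [List.mem_singleton, pvSteps]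
    constructor
    · intro h
      exact ⟨h, fun t ht => absurd ht (by omega)⟩
    · intro h
      exact h.1
  have hs0 : ∀ (start : Int) (x : Int) (nbr : Int → List Int), x ∈ [start] ↔
      ∃ t, t ≤ 0 ∧ pvSteps nbr t start x := by
    intro start x nbr
    simp only [List.mem_singleton]
    constructor
    · intro h
      exact ⟨0, le_refl _, h⟩
    · rintro ⟨t, ht, hstx⟩
      have h0 : t = 0 := by omega
      subst h0
      exact hstx
  -- A returns the least walk length
  have hAval : levelLoopL nbrF k 200005 [n] [n] 0 = ((Nat.find hex : Nat) : Int) := by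
    have := pv_levelCorrect nbrF n k (Nat.find hex) 200005 0 [n] [n]
      (fun x => hf0 n x nbrF) (fun x => hs0 n x nbrF)
      (by simpa using hr) (by simpa using hminr) (by omega)
    simpa using this
  -- the backward walks from k to n have the same lengths
  have hrevF : ∀ t, pvSteps nbrF t n k → pvSteps nbrB t k n := fun t h =>
    pv_steps_rev nbrF nbrB pv_flipFB t n k hn0 hn1 h
  have hrevB : ∀ t, pvSteps nbrB t k n → pvSteps nbrF t n k := fun t h =>
    pv_steps_rev nbrB nbrF
      (fun b c hb0 hb1 hc0 hc1 hm => pv_flipBF c b hc0 hc1 hb0 hb1 hm) t k n hk0 hk1 h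
  -- B returns the least walk length as well
  have hBval : levelLoopL nbrB n 200005 [k] [k] 0 = ((Nat.find hex : Nat) : Int) := by
    have := pv_levelCorrect nbrB k n (Nat.find hex) 200005 0 [k] [k]
      (fun x => hf0 k x nbrB) (fun x => hs0 k x nbrB)
      (by simpa using hrevF (Nat.find hex) hr)
      (by
        intro t ht hs
        exact hminr t (by simpa using ht) (hrevB t hs))
      (by omega)
    simpa using this
  -- B's array-state loop equals its list-state twin
  have hrelB : pvRelB ((Array.replicate 100001 false).setIfInBounds k.toNat true) [k] := by
    refine ⟨by simp, ?_⟩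
    intro i hi
    have hkc : ((k.toNat : Nat) : Int) = k := Int.toNat_of_nonneg hk0
    by_cases hik : k.toNat = i
    · subst hik
      rw [pv_getD_setB_self _ _ _ _ (by simp; omega), hkc]
      simp
    · rw [pv_getD_setB_ne _ _ _ _ _ hik]
      have : (Array.replicate 100001 false).getD i false = false := by
        simp [Array.getD, hi]
      rw [this]
      simp only [List.mem_singleton, Bool.false_eq_true, false_iff]
      intro h
      exact hik (by omega)
  have hB1 : levelLoop nbrB n 200005 #[k] ((Array.replicate 100001 false).setIfInBounds k.toNat true) 0
      = levelLoopL nbrB n 200005 [k] [k] 0 :=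
    pv_bridgeB nbrB n 200005 #[k] [k]
      ((Array.replicate 100001 false).setIfInBounds k.toNat true) [k] 0 (by simp) hrelB
  rw [hA1, hmain, hAval, hB1, hBval]
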